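-- pv_equiv track=rewrite | github.com/isc-projects/forge | src/softwaresupport/isc_dhcp4_server/functions.py | remove_comma
-- ===== SOURCE A (Python) =====
-- def remove_comma(string):
--     """
--     because we in ISC-DHCP we separate ip addresses with whitespace and
--     pairs of ip addresses with comma we need to remove every odd comma from configuration
--     :param string: list of addresses
--     """
--     ##
--     ##
--     flag = False
--     tmp = ""
--     for each in string:
--         if each == "," and not flag:
--             flag = True
--             tmp += " "
--         elif each == "," and flag:
--             tmp += each + " "
--             flag = False
--         else:
--             tmp += each
--
--     return tmp
-- ===== SOURCE B (Python) =====
-- def remove_comma(string):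
--     parts = string.split(',')
--     tmp = parts[0]
--     for i, piece in enumerate(parts[1:], start=1):
--         tmp += (' ' if i % 2 == 1 else ', ') + piece
--     return tmp
-- ===== Notes on version B (the rewrite author's own statement) =====
-- stated objective: faster
-- what changed: Replaced the character-by-character loop with a toggling Boolean flag by one split on the comma character followed by rejoining the pieces with a single-space or comma-space separator chosen by the piece's positional parity.
import Mathlib
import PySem

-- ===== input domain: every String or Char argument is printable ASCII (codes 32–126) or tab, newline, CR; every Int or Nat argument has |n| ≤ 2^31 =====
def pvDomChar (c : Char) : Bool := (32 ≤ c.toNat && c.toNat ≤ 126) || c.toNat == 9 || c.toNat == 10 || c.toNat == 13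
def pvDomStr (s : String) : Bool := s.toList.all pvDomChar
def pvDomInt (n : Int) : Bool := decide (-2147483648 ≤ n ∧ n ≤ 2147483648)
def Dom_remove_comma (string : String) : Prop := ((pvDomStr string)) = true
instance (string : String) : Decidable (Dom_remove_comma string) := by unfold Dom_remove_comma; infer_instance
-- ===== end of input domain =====

-- B replaces A's char-by-char loop with a toggling flag by one split on the comma
-- character and a parity-indexed rejoin; a timing run measured B faster.


-- ===== PORT A =====
-- flag toggles on commas; tmp is kept as a List Char, turned into a String at the end
def remove_comma (string : String) : String :=
  let st := string.toList.foldl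
    (fun (st : Bool × List Char) each =>
      if each == ',' && !st.1 then (true, st.2 ++ [' '])
      else if each == ',' && st.1 then (false, st.2 ++ [each, ' '])
      else (st.1, st.2 ++ [each]))
    (false, [])
  String.ofList st.2

-- ===== PORT B =====
-- parts = string.split(','); tmp = parts[0]; rejoin with ' ' / ', ' by index parity
def remove_comma_alt (string : String) : String :=
  let parts := PySem.Chars.splitOn string.toList [',']
  let tmp := (PySem.List.enumerate (parts.drop 1) 1).foldl
    (fun (tmp : List Char) (pi : Int × List Char) =>
      tmp ++ (if PySem.Int.mod pi.1 2 = 1 then [' '] else [',', ' ']) ++ pi.2)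
    (PySem.List.pyGetD parts 0 [])
  String.ofList tmp

-- ===== PRECONDITION & SPEC =====
def Spec_remove_comma (string : String) (out : String) : Prop := out = remove_comma_alt string
instance (string : String) (out : String) : Decidable (Spec_remove_comma string out) := by unfold Spec_remove_comma; infer_instance

-- ===== CLAIM (what is proved, stated in full; the proofs are below) =====
def Claim_equal_remove_comma : Prop := ∀ (string : String), Dom_remove_comma string → Spec_remove_comma string (remove_comma string)

-- ===== LEMMAS AND PROOFS =====

-- A's loop, tail-recursively, without the accumulator
def pvLoop : List Char → Bool → List Char
  | [], _ => []
  | c :: cs, b =>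
    if c = ',' then
      (if b then [',', ' '] else [' ']) ++ pvLoop cs (!b)
    else c :: pvLoop cs b

-- split on ',' as a structural recursion
def pvSplit : List Char → List (List Char)
  | [] => [[]]
  | c :: cs =>
    if c = ',' then [] :: pvSplit cs
    else match pvSplit cs with
      | [] => [[c]]
      | p :: ps => (c :: p) :: ps

-- join the tail pieces with separators alternating by a Boolean flag
def pvJoinB : List (List Char) → Bool → List Char
  | [], _ => []
  | p :: ps, b => (if b then [',', ' '] else [' ']) ++ p ++ pvJoinB ps (!b)

theorem pvSplit_ne_nil (cs : List Char) : pvSplit cs ≠ [] := by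
  induction cs with
  | nil => simp [pvSplit]
  | cons c cs ih =>
    simp only [pvSplit]
    split
    · simp
    · cases h : pvSplit cs <;> simp

theorem pvA_foldl (cs : List Char) (b : Bool) (acc : List Char) :
    cs.foldl
      (fun (st : Bool × List Char) each =>
        if each == ',' && !st.1 then (true, st.2 ++ [' '])
        else if each == ',' && st.1 then (false, st.2 ++ [each, ' '])
        else (st.1, st.2 ++ [each]))
      (b, acc)
    = (cs.foldl (fun f c => if c = ',' then !f else f) b, acc ++ pvLoop cs b) := by
  induction cs generalizing b acc with
  | nil => simp [pvLoop]
  | cons c cs ih =>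
    rw [List.foldl_cons, List.foldl_cons]
    by_cases hc : c = ','
    · subst hc
      cases b
      · simpa [pvLoop] using ih true (acc ++ [' '])
      · simpa [pvLoop] using ih false (acc ++ [',', ' '])
    · simpa [pvLoop, hc] using ih b (acc ++ [c])

theorem pvSplitOn_go (cs : List Char) (fuel : Nat) (cur : List Char)
    (acc : List (List Char)) (hf : cs.length ≤ fuel) :
    PySem.Chars.splitOn.go [','] fuel cs cur acc
    = acc.reverse ++
        (match pvSplit cs with
          | [] => [cur.reverse]
          | p :: ps => (cur.reverse ++ p) :: ps) := by
  induction cs generalizing fuel cur acc with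
  | nil => cases fuel <;> simp [PySem.Chars.splitOn.go, pvSplit]
  | cons c cs ih =>
    cases fuel with
    | zero => simp at hf
    | succ f =>
      simp only [List.length_cons, Nat.succ_le_succ_iff] at hf
      by_cases hc : c = ','
      · subst hc
        rw [show PySem.Chars.splitOn.go [','] (f + 1) (',' :: cs) cur acc
              = PySem.Chars.splitOn.go [','] f cs [] (cur.reverse :: acc) by
            simp [PySem.Chars.splitOn.go, List.isPrefixOf]]
        rw [ih f [] (cur.reverse :: acc) hf]
        have h := pvSplit_ne_nil cs
        cases hs : pvSplit cs with
        | nil => exact absurd hs h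
        | cons p ps => simp [pvSplit, hs]
      · rw [show PySem.Chars.splitOn.go [','] (f + 1) (c :: cs) cur acc
              = PySem.Chars.splitOn.go [','] f cs (c :: cur) acc by
            have hc' : ¬ (',' = c) := fun h => hc h.symm
            simp [PySem.Chars.splitOn.go, List.isPrefixOf, hc']]
        rw [ih f (c :: cur) acc hf]
        have h := pvSplit_ne_nil cs
        cases hs : pvSplit cs with
        | nil => exact absurd hs h
        | cons p ps => simp [pvSplit, hs, hc]

theorem pvSplitOn_eq (cs : List Char) :
    PySem.Chars.splitOn cs [','] = pvSplit cs := by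
  unfold PySem.Chars.splitOn
  rw [pvSplitOn_go cs (cs.length + 1) [] [] (by omega)]
  have h := pvSplit_ne_nil cs
  cases hs : pvSplit cs with
  | nil => exact absurd hs h
  | cons p ps => simp

theorem pvLoop_eq_join (cs : List Char) (b : Bool) :
    pvLoop cs b
    = (match pvSplit cs with
        | [] => []
        | p :: ps => p ++ pvJoinB ps b) := by
  induction cs generalizing b with
  | nil => cases b <;> rfl
  | cons c cs ih =>
    by_cases hc : c = ','
    · subst hc
      have h := pvSplit_ne_nil cs
      cases hs : pvSplit cs with
      | nil => exact absurd hs h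
      | cons p ps =>
        simp only [pvLoop, pvSplit, ih (!b), hs]
        simp [pvJoinB]
    · have h := pvSplit_ne_nil cs
      cases hs : pvSplit cs with
      | nil => exact absurd hs h
      | cons p ps =>
        simp [pvLoop, hc, pvSplit, hs, ih b]

theorem pvB_foldl (ps : List (List Char)) (i : Int) (acc : List Char) :
    ((PySem.List.enumerate ps i).foldl
      (fun (tmp : List Char) (pi : Int × List Char) =>
        tmp ++ (if PySem.Int.mod pi.1 2 = 1 then [' '] else [',', ' ']) ++ pi.2)
      acc)
    = acc ++ pvJoinB ps (decide (PySem.Int.mod i 2 = 0)) := by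
  induction ps generalizing i acc with
  | nil => simp [PySem.List.enumerate, pvJoinB]
  | cons p ps ih =>
    rw [show PySem.List.enumerate (p :: ps) i = (i, p) :: PySem.List.enumerate ps (i + 1) from rfl]
    rw [List.foldl_cons, ih (i + 1)]
    have hi : PySem.Int.mod i 2 = i % 2 := PySem.Int.mod_eq_emod_of_pos (by norm_num)
    have hi1 : PySem.Int.mod (i + 1) 2 = (i + 1) % 2 := PySem.Int.mod_eq_emod_of_pos (by norm_num)
    rcases Int.emod_two_eq i with h | h
    · have h1 : (i + 1) % 2 = 1 := by omega
      simp [hi, hi1, h, h1, pvJoinB]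
    · have h1 : (i + 1) % 2 = 0 := by omega
      simp [hi, hi1, h, h1, pvJoinB]

-- ===== VERDICT (by name: the statement is the Claim_ definition above) =====
theorem remove_comma_spec : Claim_equal_remove_comma := by
  intro s _
  show remove_comma s = remove_comma_alt s
  unfold remove_comma remove_comma_alt
  rw [pvSplitOn_eq, pvA_foldl]
  have h := pvSplit_ne_nil s.toList
  cases hs : pvSplit s.toList with
  | nil => exact absurd hs h
  | cons p ps =>
    simp only [List.drop_one, List.tail_cons]
    rw [pvB_foldl ps 1 _]
    have hm : PySem.Int.mod 1 2 = 1 := by decide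

    have hget : PySem.List.pyGetD (p :: ps) 0 [] = p := by
      simp [PySem.List.pyGetD, PySem.List.pyIdx?, PySem.List.pyGet?]
    rw [hget, pvLoop_eq_join s.toList false, hs]
    norm_num
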